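-- pv_equiv track=rewrite | github.com/gigawhitlocks/rhyming | rhyming.py | three_phrase
-- ===== SOURCE A (Python) =====
-- def three_phrase(list):
--     phrases = []
--     for i, word in enumerate(list):
--         phrase = []
--         if i == 0:
--             phrase.append(None)
--         else:
--             phrase.append(list[i-1])
--
--         phrase.append(word)
--
--         try:
--             phrase.append(list[i+1])
--         except IndexError:
--             phrase.append(None)
--
--         phrases.append(tuple(phrase))
--     return phrases
-- ===== SOURCE B (Python) =====
-- def three_phrase(list):
--     prevs = [None] + list[:-1]
--     nexts = list[1:] + [None]
--     return [(p, c, n) for p, c, n in zip(prevs, list, nexts)]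
-- ===== Notes on version B (the rewrite author's own statement) =====
-- stated objective: idiomatic
-- what changed: Replaces the index-based enumerate loop with its try/except IndexError by zipping the list with two None-padded shifted copies ([None]+list[:-1] and list[1:]+[None]).
import Mathlib
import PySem

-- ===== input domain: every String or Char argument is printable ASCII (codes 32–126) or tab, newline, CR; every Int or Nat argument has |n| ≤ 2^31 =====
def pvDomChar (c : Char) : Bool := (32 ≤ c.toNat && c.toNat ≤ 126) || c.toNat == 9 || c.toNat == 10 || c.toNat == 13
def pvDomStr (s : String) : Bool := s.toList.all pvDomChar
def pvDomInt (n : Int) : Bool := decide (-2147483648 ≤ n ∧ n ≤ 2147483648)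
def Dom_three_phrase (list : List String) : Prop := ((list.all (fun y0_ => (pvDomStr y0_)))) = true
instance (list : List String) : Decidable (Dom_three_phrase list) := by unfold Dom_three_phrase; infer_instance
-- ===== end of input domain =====

-- B replaces A's index-based loop with try/except by zipping two None-padded shifted copies of the list (idiomatic).

-- ===== PORT A =====
-- Index loop over enumerate; list[i-1] (always in range when i ≠ 0) and list[i+1] (try/except
-- IndexError → None) are both ported with PySem.List.pyGet?, whose `none` is exactly IndexError.
def three_phrase (list : List String) : List (Option String × String × Option String) :=
  (PySem.List.enumerate list).foldl
    (fun phrases iw =>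
      let i := iw.1
      let word := iw.2
      let prev : Option String := if i = 0 then none else PySem.List.pyGet? list (i - 1)
      let next : Option String := PySem.List.pyGet? list (i + 1)
      phrases ++ [(prev, word, next)]) []

-- ===== PORT B =====
-- prevs = [None] + list[:-1]; nexts = list[1:] + [None]; zip the three sequences.
def three_phrase_alt (list : List String) : List (Option String × String × Option String) :=
  let prevs : List (Option String) := none :: (PySem.List.slice list none (some (-1))).map some
  let nexts : List (Option String) := (PySem.List.slice list (some 1) none).map some ++ [none]
  List.zip prevs (List.zip list nexts)

-- ===== PRECONDITION & SPEC =====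
def Spec_three_phrase (list : List String) (out : List (Option String × String × Option String)) : Prop := out = three_phrase_alt list
instance (list : List String) (out : List (Option String × String × Option String)) : Decidable (Spec_three_phrase list out) := by unfold Spec_three_phrase; infer_instance

-- ===== CLAIM (what is proved, stated in full; the proofs are below) =====
def Claim_equal_three_phrase : Prop := ∀ (list : List String), Dom_three_phrase list → Spec_three_phrase list (three_phrase list)

-- ===== LEMMAS AND PROOFS =====

lemma getElem_enumerate (l : List String) (s : Int) (i : Nat)
    (h : i < (PySem.List.enumerate l s).length) :
    (PySem.List.enumerate l s)[i] =
      (s + i, l[i]'(by simpa [PySem.List.length_enumerate] using h)) := by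
  induction l generalizing s i with
  | nil => simp at h
  | cons x xs ih =>
    simp only [PySem.List.enumerate_cons]
    cases i with
    | zero => simp
    | succ j =>
      have hj : j < (PySem.List.enumerate xs (s + 1)).length := by
        have := h; simp [PySem.List.length_enumerate] at this ⊢; omega
      simp only [List.getElem_cons_succ, ih (s + 1) j hj, Prod.mk.injEq]
      exact ⟨by push_cast; ring, trivial⟩

lemma slice_to_neg_one (l : List String) :
    PySem.List.slice l none (some (-1)) = l.dropLast := by
  simp [PySem.List.slice, PySem.List.clampIdx, List.dropLast_eq_take]
  split_ifs with h
  · simp [h]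
  · have hl : 0 < l.length := List.length_pos_iff.mpr h
    omega

lemma length_alt (l : List String) : (three_phrase_alt l).length = l.length := by
  simp [three_phrase_alt, slice_to_neg_one,
    PySem.List.slice_from l (by norm_num : (0:Int) ≤ 1)]
  omega

theorem three_phrase_spec : Claim_equal_three_phrase := by
  intro l _
  unfold Spec_three_phrase three_phrase
  rw [PySem.List.foldl_append_singleton_eq_map, List.nil_append]
  apply List.ext_getElem
  · simp [length_alt, PySem.List.length_enumerate]
  · intro i h1 h2
    have hi : i < l.length := by
      simpa [PySem.List.length_enumerate] using h1
    have he : i < (PySem.List.enumerate l).length := by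
      simpa [PySem.List.length_enumerate] using hi
    rw [List.getElem_map, getElem_enumerate l 0 i he]
    simp only [three_phrase_alt, List.getElem_zip, Prod.mk.injEq]
    refine ⟨?_, trivial, ?_⟩
    · -- prev component
      rcases Nat.eq_zero_or_pos i with h0 | h0
      · subst h0; simp
      · have : ¬ ((0 : Int) + (i : Int) = 0) := by omega
        simp only [this, if_false]
        have hcast : (0 : Int) + (i : Int) - 1 = ((i - 1 : Nat) : Int) := by omega
        rw [hcast, PySem.List.pyGet?_natCast]
        cases i with
        | zero => omega
        | succ j =>
          simp [slice_to_neg_one, List.getElem?_eq_getElem (by omega : j < l.length)]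
    · -- next component
      have hcast : (0 : Int) + (i : Int) + 1 = ((i + 1 : Nat) : Int) := by omega
      rw [hcast, PySem.List.pyGet?_natCast]
      simp only [PySem.List.slice_from l (by norm_num : (0:Int) ≤ 1)]
      rcases Nat.lt_or_ge (i + 1) l.length with hlt | hge
      · rw [List.getElem?_eq_getElem hlt]
        rw [List.getElem_append_left (by simp; omega)]
        simp
      · rw [List.getElem?_eq_none (by omega)]
        rw [List.getElem_append_right (by simp; omega)]
        simp
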